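-- pv_equiv track=rewrite | github.com/flybfree/lantern-city | src/lantern_city/engine.py | _conversation_outcome_read
-- ===== SOURCE A (Python) =====
-- def _conversation_outcome_read(dialogue_act: str, npc_stance: str) -> str:
--     text = f"{dialogue_act} {npc_stance}".lower()
--     if any(token in text for token in ("refus", "procedur", "official")):
--         return "procedural block or formal refusal"
--     if any(token in text for token in ("warn", "caution", "risk", "afraid", "fear")):
--         return "warning delivered under pressure"
--     if any(token in text for token in ("redirect", "deflect", "dodge", "avoid")):
--         return "careful deflection with a redirect"
--     if any(token in text for token in ("confirm", "answer", "reveal", "explain", "hint")):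
--         return "direct answer with usable detail"
--     if any(token in text for token in ("guard", "careful", "hesitant", "wary")):
--         return "guarded answer with limited detail"
--     return ""
-- ===== SOURCE B (Python) =====
-- LABELS = [
--     "procedural block or formal refusal",
--     "warning delivered under pressure",
--     "careful deflection with a redirect",
--     "direct answer with usable detail",
--     "guarded answer with limited detail",
-- ]
--
-- TOKENS = [
--     ("refus", 0), ("procedur", 0), ("official", 0),
--     ("warn", 1), ("caution", 1), ("risk", 1), ("afraid", 1), ("fear", 1),
--     ("redirect", 2), ("deflect", 2), ("dodge", 2), ("avoid", 2),
--     ("confirm", 3), ("answer", 3), ("reveal", 3), ("explain", 3), ("hint", 3),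
--     ("guard", 4), ("careful", 4), ("hesitant", 4), ("wary", 4),
-- ]
--
--
-- def _conversation_outcome_read(dialogue_act: str, npc_stance: str) -> str:
--     text = f"{dialogue_act} {npc_stance}".lower()
--     matched = [False] * len(LABELS)
--     for i in range(len(text)):
--         for tok, cat in TOKENS:
--             if text.startswith(tok, i):
--                 matched[cat] = True
--     for cat, hit in enumerate(matched):
--         if hit:
--             return LABELS[cat]
--     return ""
-- ===== Notes on version B (the rewrite author's own statement) =====
-- stated objective: alternative
-- what changed: Instead of five staged substring-search passes over the text, B makes one left-to-right scan over character positions, setting per-category match flags via startswith at each position, and then returns the label of the first set flag.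
import Mathlib
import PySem

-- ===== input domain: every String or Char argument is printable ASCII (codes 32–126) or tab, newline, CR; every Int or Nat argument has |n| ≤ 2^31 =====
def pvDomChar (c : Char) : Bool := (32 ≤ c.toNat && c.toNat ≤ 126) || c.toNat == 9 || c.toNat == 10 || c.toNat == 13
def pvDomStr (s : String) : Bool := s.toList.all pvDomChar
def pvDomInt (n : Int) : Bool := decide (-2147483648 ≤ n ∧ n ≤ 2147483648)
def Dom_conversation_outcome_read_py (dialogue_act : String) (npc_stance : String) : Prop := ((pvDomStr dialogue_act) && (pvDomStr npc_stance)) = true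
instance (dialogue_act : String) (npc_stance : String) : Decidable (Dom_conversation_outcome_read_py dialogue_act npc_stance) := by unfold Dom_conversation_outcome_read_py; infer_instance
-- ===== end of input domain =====

-- B replaces A's five staged substring-search passes by one left-to-right scan over character positions
-- accumulating per-category match flags, then a priority pick of the first set flag (alternative algorithm; same values).

-- ===== PORT A =====
def conversation_outcome_read_py (dialogue_act : String) (npc_stance : String) : String :=
  -- text = f"{dialogue_act} {npc_stance}".lower()  (concatenation done on .toList, exact for Python str +)
  let text := PySem.Str.lower (String.mk (dialogue_act.toList ++ (' ' :: npc_stance.toList)))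
  if [("refus" : String), "procedur", "official"].any (fun tok => PySem.Str.isIn tok text) then
    "procedural block or formal refusal"
  else if [("warn" : String), "caution", "risk", "afraid", "fear"].any (fun tok => PySem.Str.isIn tok text) then
    "warning delivered under pressure"
  else if [("redirect" : String), "deflect", "dodge", "avoid"].any (fun tok => PySem.Str.isIn tok text) then
    "careful deflection with a redirect"
  else if [("confirm" : String), "answer", "reveal", "explain", "hint"].any (fun tok => PySem.Str.isIn tok text) then
    "direct answer with usable detail"
  else if [("guard" : String), "careful", "hesitant", "wary"].any (fun tok => PySem.Str.isIn tok text) then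
    "guarded answer with limited detail"
  else ""

-- ===== PORT B =====
def pvLabels : List String :=
  [ "procedural block or formal refusal",
    "warning delivered under pressure",
    "careful deflection with a redirect",
    "direct answer with usable detail",
    "guarded answer with limited detail" ]

def pvTokens : List (List Char × Nat) :=
  [ ("refus".toList, 0), ("procedur".toList, 0), ("official".toList, 0),
    ("warn".toList, 1), ("caution".toList, 1), ("risk".toList, 1), ("afraid".toList, 1), ("fear".toList, 1),
    ("redirect".toList, 2), ("deflect".toList, 2), ("dodge".toList, 2), ("avoid".toList, 2),
    ("confirm".toList, 3), ("answer".toList, 3), ("reveal".toList, 3), ("explain".toList, 3), ("hint".toList, 3),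
    ("guard".toList, 4), ("careful".toList, 4), ("hesitant".toList, 4), ("wary".toList, 4) ]

-- inner loop of B: 'for tok, cat in TOKENS: if text.startswith(tok, i): matched[cat] = True'
def pvMark (t : List Char) (m : List Bool) (i : Nat) : List Bool :=
  pvTokens.foldl (fun m tc => if tc.1.isPrefixOf (t.drop i) then m.set tc.2 true else m) m

-- outer loop of B: 'for i in range(len(text)):'
def pvScan (t : List Char) : List Bool :=
  (List.range t.length).foldl (pvMark t) [false, false, false, false, false]

-- B's final loop: 'for cat, hit in enumerate(matched): if hit: return LABELS[cat]' then 'return ""'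
def pvPick : Nat → List Bool → String
  | _, [] => ""
  | c, b :: rest => if b then pvLabels.getD c "" else pvPick (c + 1) rest

def conversation_outcome_read_py_alt (dialogue_act : String) (npc_stance : String) : String :=
  let text := PySem.Str.lower (String.mk (dialogue_act.toList ++ (' ' :: npc_stance.toList)))
  pvPick 0 (pvScan text.toList)

-- ===== PRECONDITION & SPEC =====
def Spec_conversation_outcome_read_py (dialogue_act : String) (npc_stance : String) (out : String) : Prop := out = conversation_outcome_read_py_alt dialogue_act npc_stance
instance (dialogue_act : String) (npc_stance : String) (out : String) : Decidable (Spec_conversation_outcome_read_py dialogue_act npc_stance out) := by unfold Spec_conversation_outcome_read_py; infer_instance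

-- ===== CLAIM (what is proved, stated in full; the proofs are below) =====
def Claim_equal_conversation_outcome_read_py : Prop := ∀ (dialogue_act : String) (npc_stance : String), Dom_conversation_outcome_read_py dialogue_act npc_stance → Spec_conversation_outcome_read_py dialogue_act npc_stance (conversation_outcome_read_py dialogue_act npc_stance)

-- ===== LEMMAS AND PROOFS =====

theorem pvFold_length (P : List Char × Nat → Bool) :
    ∀ (toks : List (List Char × Nat)) (m : List Bool),
      (toks.foldl (fun m tc => if P tc then m.set tc.2 true else m) m).length = m.length := by
  intro toks
  induction toks with
  | nil => intro m; rfl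
  | cons hd tl ih =>
      intro m
      simp only [List.foldl_cons]
      rw [ih]
      split <;> simp

theorem pvFold_getD (P : List Char × Nat → Bool) :
    ∀ (toks : List (List Char × Nat)) (m : List Bool) (c : Nat),
      (∀ tc ∈ toks, tc.2 < m.length) → c < m.length →
      (toks.foldl (fun m tc => if P tc then m.set tc.2 true else m) m).getD c false
        = (m.getD c false || toks.any (fun tc => tc.2 == c && P tc)) := by
  intro toks
  induction toks with
  | nil => intro m c _ _; simp
  | cons hd tl ih =>
      intro m c h hc
      simp only [List.foldl_cons, List.any_cons]
      by_cases hP : P hd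
      · rw [if_pos hP]
        rw [ih (m.set hd.2 true) c (by intro tc htc; simpa using h tc (List.mem_cons_of_mem _ htc)) (by simpa using hc)]
        have hhd : hd.2 < m.length := h hd (List.mem_cons_self ..)
        by_cases he : hd.2 = c
        · subst he
          simp [List.getD, List.getElem?_set, hhd, hP]
        · have hb : (hd.2 == c) = false := by simp [he]
          simp [List.getD, List.getElem?_set, he, hP, hb]
      · rw [if_neg hP]
        rw [ih m c (fun tc htc => h tc (List.mem_cons_of_mem _ htc)) hc]
        simp [hP]

theorem pvTokens_lt : ∀ tc ∈ pvTokens, tc.2 < 5 := by decide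

theorem pvMark_length (t : List Char) (m : List Bool) (i : Nat) :
    (pvMark t m i).length = m.length :=
  pvFold_length _ pvTokens m

theorem pvMark_getD (t : List Char) (m : List Bool) (i : Nat) (c : Nat)
    (hm : m.length = 5) (hc : c < 5) :
    (pvMark t m i).getD c false
      = (m.getD c false || pvTokens.any (fun tc => tc.2 == c && tc.1.isPrefixOf (t.drop i))) :=
  pvFold_getD _ pvTokens m c (fun tc htc => hm ▸ pvTokens_lt tc htc) (hm ▸ hc)

theorem pvScanAux (t : List Char) : ∀ (l : List Nat) (m : List Bool), m.length = 5 →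
    ∀ c, c < 5 → (l.foldl (pvMark t) m).getD c false
      = (m.getD c false || l.any (fun i => pvTokens.any (fun tc => tc.2 == c && tc.1.isPrefixOf (t.drop i)))) := by
  intro l
  induction l with
  | nil => intro m _ c _; simp
  | cons i l ih =>
      intro m hm c hc
      simp only [List.foldl_cons, List.any_cons]
      rw [ih (pvMark t m i) (by rw [pvMark_length, hm]) c hc, pvMark_getD t m i c hm hc, Bool.or_assoc]

theorem pvExists_lt_iff_isIn (t tok : List Char) (h : tok ≠ []) :
    (∃ i, i < t.length ∧ tok <+: t.drop i) ↔ PySem.Chars.isIn tok t = true := by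
  rw [← PySem.Chars.exists_prefix_drop_iff_isIn]
  constructor
  · rintro ⟨i, _, hp⟩; exact ⟨i, hp⟩
  · rintro ⟨j, hp⟩
    by_cases hj : j < t.length
    · exact ⟨j, hj, hp⟩
    · exfalso
      have : t.drop j = [] := List.drop_eq_nil_of_le (by omega)
      rw [this] at hp
      exact h (List.prefix_nil.mp hp)

def pvCond (c : Nat) (t : List Char) : Bool :=
  (List.range t.length).any (fun i => pvTokens.any (fun tc => tc.2 == c && tc.1.isPrefixOf (t.drop i)))

theorem pvCond_iff (c : Nat) (t : List Char) :
    pvCond c t = true ↔ ∃ tc ∈ pvTokens, tc.2 = c ∧ ∃ i, i < t.length ∧ tc.1 <+: t.drop i := by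
  simp only [pvCond, List.any_eq_true, List.mem_range, List.isPrefixOf_iff_prefix,
    Bool.and_eq_true, beq_iff_eq]
  aesop

theorem pvCond_zero (t : List Char) :
    pvCond 0 t = (PySem.Chars.isIn "refus".toList t || PySem.Chars.isIn "procedur".toList t
      || PySem.Chars.isIn "official".toList t) := by
  rw [Bool.eq_iff_iff, pvCond_iff]
  simp only [pvTokens, List.mem_cons, List.not_mem_nil, or_false, Bool.or_eq_true]
  constructor
  · rintro ⟨tc, htc, hc, hex⟩
    rcases htc with h|h|h|h|h|h|h|h|h|h|h|h|h|h|h|h|h|h|h|h|h <;> subst h <;>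
      first
        | exact absurd hc (by decide)
        | exact Or.inl (Or.inl ((pvExists_lt_iff_isIn t _ (by decide)).mp hex))
        | exact Or.inl (Or.inr ((pvExists_lt_iff_isIn t _ (by decide)).mp hex))
        | exact Or.inr ((pvExists_lt_iff_isIn t _ (by decide)).mp hex)
  · rintro ((h|h)|h)
    · exact ⟨("refus".toList, 0), by simp, rfl, (pvExists_lt_iff_isIn t _ (by decide)).mpr h⟩
    · exact ⟨("procedur".toList, 0), by simp, rfl, (pvExists_lt_iff_isIn t _ (by decide)).mpr h⟩
    · exact ⟨("official".toList, 0), by simp, rfl, (pvExists_lt_iff_isIn t _ (by decide)).mpr h⟩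

theorem pvCond_one (t : List Char) :
    pvCond 1 t = (PySem.Chars.isIn "warn".toList t || PySem.Chars.isIn "caution".toList t || PySem.Chars.isIn "risk".toList t || PySem.Chars.isIn "afraid".toList t || PySem.Chars.isIn "fear".toList t) := by
  rw [Bool.eq_iff_iff, pvCond_iff]
  simp only [pvTokens, List.mem_cons, List.not_mem_nil, or_false, Bool.or_eq_true]
  constructor
  · rintro ⟨tc, htc, hc, hex⟩
    rcases htc with h|h|h|h|h|h|h|h|h|h|h|h|h|h|h|h|h|h|h|h|h <;> subst h <;>
      first
        | exact absurd hc (by decide)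
        | exact Or.inl (Or.inl (Or.inl (Or.inl ((pvExists_lt_iff_isIn t _ (by decide)).mp hex))))
        | exact Or.inl (Or.inl (Or.inl (Or.inr ((pvExists_lt_iff_isIn t _ (by decide)).mp hex))))
        | exact Or.inl (Or.inl (Or.inr ((pvExists_lt_iff_isIn t _ (by decide)).mp hex)))
        | exact Or.inl (Or.inr ((pvExists_lt_iff_isIn t _ (by decide)).mp hex))
        | exact Or.inr ((pvExists_lt_iff_isIn t _ (by decide)).mp hex)
  · rintro ((((h|h)|h)|h)|h)
    · exact ⟨("warn".toList, 1), by simp, rfl, (pvExists_lt_iff_isIn t _ (by decide)).mpr h⟩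
    · exact ⟨("caution".toList, 1), by simp, rfl, (pvExists_lt_iff_isIn t _ (by decide)).mpr h⟩
    · exact ⟨("risk".toList, 1), by simp, rfl, (pvExists_lt_iff_isIn t _ (by decide)).mpr h⟩
    · exact ⟨("afraid".toList, 1), by simp, rfl, (pvExists_lt_iff_isIn t _ (by decide)).mpr h⟩
    · exact ⟨("fear".toList, 1), by simp, rfl, (pvExists_lt_iff_isIn t _ (by decide)).mpr h⟩

theorem pvCond_two (t : List Char) :
    pvCond 2 t = (PySem.Chars.isIn "redirect".toList t || PySem.Chars.isIn "deflect".toList t || PySem.Chars.isIn "dodge".toList t || PySem.Chars.isIn "avoid".toList t) := by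
  rw [Bool.eq_iff_iff, pvCond_iff]
  simp only [pvTokens, List.mem_cons, List.not_mem_nil, or_false, Bool.or_eq_true]
  constructor
  · rintro ⟨tc, htc, hc, hex⟩
    rcases htc with h|h|h|h|h|h|h|h|h|h|h|h|h|h|h|h|h|h|h|h|h <;> subst h <;>
      first
        | exact absurd hc (by decide)
        | exact Or.inl (Or.inl (Or.inl ((pvExists_lt_iff_isIn t _ (by decide)).mp hex)))
        | exact Or.inl (Or.inl (Or.inr ((pvExists_lt_iff_isIn t _ (by decide)).mp hex)))
        | exact Or.inl (Or.inr ((pvExists_lt_iff_isIn t _ (by decide)).mp hex))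
        | exact Or.inr ((pvExists_lt_iff_isIn t _ (by decide)).mp hex)
  · rintro (((h|h)|h)|h)
    · exact ⟨("redirect".toList, 2), by simp, rfl, (pvExists_lt_iff_isIn t _ (by decide)).mpr h⟩
    · exact ⟨("deflect".toList, 2), by simp, rfl, (pvExists_lt_iff_isIn t _ (by decide)).mpr h⟩
    · exact ⟨("dodge".toList, 2), by simp, rfl, (pvExists_lt_iff_isIn t _ (by decide)).mpr h⟩
    · exact ⟨("avoid".toList, 2), by simp, rfl, (pvExists_lt_iff_isIn t _ (by decide)).mpr h⟩

theorem pvCond_three (t : List Char) :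
    pvCond 3 t = (PySem.Chars.isIn "confirm".toList t || PySem.Chars.isIn "answer".toList t || PySem.Chars.isIn "reveal".toList t || PySem.Chars.isIn "explain".toList t || PySem.Chars.isIn "hint".toList t) := by
  rw [Bool.eq_iff_iff, pvCond_iff]
  simp only [pvTokens, List.mem_cons, List.not_mem_nil, or_false, Bool.or_eq_true]
  constructor
  · rintro ⟨tc, htc, hc, hex⟩
    rcases htc with h|h|h|h|h|h|h|h|h|h|h|h|h|h|h|h|h|h|h|h|h <;> subst h <;>
      first
        | exact absurd hc (by decide)
        | exact Or.inl (Or.inl (Or.inl (Or.inl ((pvExists_lt_iff_isIn t _ (by decide)).mp hex))))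
        | exact Or.inl (Or.inl (Or.inl (Or.inr ((pvExists_lt_iff_isIn t _ (by decide)).mp hex))))
        | exact Or.inl (Or.inl (Or.inr ((pvExists_lt_iff_isIn t _ (by decide)).mp hex)))
        | exact Or.inl (Or.inr ((pvExists_lt_iff_isIn t _ (by decide)).mp hex))
        | exact Or.inr ((pvExists_lt_iff_isIn t _ (by decide)).mp hex)
  · rintro ((((h|h)|h)|h)|h)
    · exact ⟨("confirm".toList, 3), by simp, rfl, (pvExists_lt_iff_isIn t _ (by decide)).mpr h⟩
    · exact ⟨("answer".toList, 3), by simp, rfl, (pvExists_lt_iff_isIn t _ (by decide)).mpr h⟩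
    · exact ⟨("reveal".toList, 3), by simp, rfl, (pvExists_lt_iff_isIn t _ (by decide)).mpr h⟩
    · exact ⟨("explain".toList, 3), by simp, rfl, (pvExists_lt_iff_isIn t _ (by decide)).mpr h⟩
    · exact ⟨("hint".toList, 3), by simp, rfl, (pvExists_lt_iff_isIn t _ (by decide)).mpr h⟩

theorem pvCond_four (t : List Char) :
    pvCond 4 t = (PySem.Chars.isIn "guard".toList t || PySem.Chars.isIn "careful".toList t || PySem.Chars.isIn "hesitant".toList t || PySem.Chars.isIn "wary".toList t) := by
  rw [Bool.eq_iff_iff, pvCond_iff]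
  simp only [pvTokens, List.mem_cons, List.not_mem_nil, or_false, Bool.or_eq_true]
  constructor
  · rintro ⟨tc, htc, hc, hex⟩
    rcases htc with h|h|h|h|h|h|h|h|h|h|h|h|h|h|h|h|h|h|h|h|h <;> subst h <;>
      first
        | exact absurd hc (by decide)
        | exact Or.inl (Or.inl (Or.inl ((pvExists_lt_iff_isIn t _ (by decide)).mp hex)))
        | exact Or.inl (Or.inl (Or.inr ((pvExists_lt_iff_isIn t _ (by decide)).mp hex)))
        | exact Or.inl (Or.inr ((pvExists_lt_iff_isIn t _ (by decide)).mp hex))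
        | exact Or.inr ((pvExists_lt_iff_isIn t _ (by decide)).mp hex)
  · rintro (((h|h)|h)|h)
    · exact ⟨("guard".toList, 4), by simp, rfl, (pvExists_lt_iff_isIn t _ (by decide)).mpr h⟩
    · exact ⟨("careful".toList, 4), by simp, rfl, (pvExists_lt_iff_isIn t _ (by decide)).mpr h⟩
    · exact ⟨("hesitant".toList, 4), by simp, rfl, (pvExists_lt_iff_isIn t _ (by decide)).mpr h⟩
    · exact ⟨("wary".toList, 4), by simp, rfl, (pvExists_lt_iff_isIn t _ (by decide)).mpr h⟩

theorem pvFoldMark_length (t : List Char) : ∀ (l : List Nat) (m : List Bool),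
    (l.foldl (pvMark t) m).length = m.length := by
  intro l
  induction l with
  | nil => intro m; rfl
  | cons i l ih => intro m; simp only [List.foldl_cons]; rw [ih, pvMark_length]

theorem pvScan_length (t : List Char) : (pvScan t).length = 5 :=
  pvFoldMark_length t _ _

theorem pvScan_getD (t : List Char) (c : Nat) (hc : c < 5) :
    (pvScan t).getD c false = pvCond c t := by
  unfold pvScan pvCond
  rw [pvScanAux t _ _ rfl c hc]
  interval_cases c <;> simp

theorem pvPick_eq (m : List Bool) (hm : m.length = 5) :
    pvPick 0 m
      = (if m.getD 0 false then "procedural block or formal refusal"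
         else if m.getD 1 false then "warning delivered under pressure"
         else if m.getD 2 false then "careful deflection with a redirect"
         else if m.getD 3 false then "direct answer with usable detail"
         else if m.getD 4 false then "guarded answer with limited detail"
         else "") := by
  match m, hm with
  | [a, b, c, d, e], _ => simp [pvPick, pvLabels, List.getD]

-- ===== VERDICT (by name: the statement is the Claim_ definition above) =====
theorem conversation_outcome_read_py_spec : Claim_equal_conversation_outcome_read_py := by
  intro da ns _
  unfold Spec_conversation_outcome_read_py conversation_outcome_read_py conversation_outcome_read_py_alt
  simp only []
  set t := (PySem.Str.lower (String.mk (da.toList ++ (' ' :: ns.toList)))).toList with ht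
  rw [pvPick_eq _ (pvScan_length _),
    pvScan_getD _ 0 (by norm_num), pvScan_getD _ 1 (by norm_num), pvScan_getD _ 2 (by norm_num),
    pvScan_getD _ 3 (by norm_num), pvScan_getD _ 4 (by norm_num),
    pvCond_zero, pvCond_one, pvCond_two, pvCond_three, pvCond_four]
  simp [PySem.Str.isIn_eq, List.any, ht, Bool.or_eq_true, or_assoc]
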